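-- pv_equiv track=rewrite | github.com/mmadme/wordle_it_mmmar | build.py | parola_valida
-- ===== SOURCE A (Python) =====
-- LETTERE_OK=set("abcdefghijklmnopqrstuvwxyz")
--
-- VOCALI=set("aeiou")
--
-- def parola_valida(word):
--     p=word.strip().lower()
--     if len(p)!=5 or not all(c in LETTERE_OK for c in p) or not any(c in VOCALI for c in p): return False
--     streak=0
--     for c in p:
--         streak=0 if c in VOCALI else streak+1
--         if streak>=4: return False
--     return True
-- ===== SOURCE B (Python) =====
-- LETTERE_OK = set("abcdefghijklmnopqrstuvwxyz")
--
-- VOCALI = set("aeiou")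
--
-- def parola_valida(word):
--     p = word.strip().lower()
--     if len(p) != 5 or not all(c in LETTERE_OK for c in p):
--         return False
--     # a length-5 word is valid iff both 4-letter windows contain a vowel
--     # (this also implies the word contains at least one vowel)
--     return any(c in VOCALI for c in p[:4]) and any(c in VOCALI for c in p[1:])
-- ===== Notes on version B (the rewrite author's own statement) =====
-- stated objective: simpler
-- what changed: Replaces the stateful consonant-streak counter loop (reset on vowels, early return at 4) with a closed-form sliding-window check: a 5-letter word is valid iff each of its two 4-letter windows contains a vowel, which also subsumes A's separate has-a-vowel guard.
import Mathlib
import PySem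

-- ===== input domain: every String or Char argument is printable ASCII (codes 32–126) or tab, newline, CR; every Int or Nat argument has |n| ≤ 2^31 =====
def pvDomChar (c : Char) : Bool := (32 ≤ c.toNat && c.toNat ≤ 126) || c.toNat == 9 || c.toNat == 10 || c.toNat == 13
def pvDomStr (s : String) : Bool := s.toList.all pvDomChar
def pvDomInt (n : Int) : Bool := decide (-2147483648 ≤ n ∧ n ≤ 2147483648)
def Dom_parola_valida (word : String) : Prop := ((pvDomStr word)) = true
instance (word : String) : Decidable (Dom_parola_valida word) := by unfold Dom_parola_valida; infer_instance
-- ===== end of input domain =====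

-- B replaces A's running consonant-streak counter with a closed-form check on the two 4-letter windows (simpler; same cost).

-- ===== PORT A =====
def pvLettereOk : PySem.Set Char := PySem.Set.ofList "abcdefghijklmnopqrstuvwxyz".toList
def pvVocali : PySem.Set Char := PySem.Set.ofList "aeiou".toList

-- the streak loop with its early return at streak >= 4
def pvStreakLoop : List Char → Nat → Bool
  | [], _ => true
  | c :: rest, streak =>
    let s := if PySem.Set.contains pvVocali c then 0 else streak + 1
    if s ≥ 4 then false else pvStreakLoop rest s

def parola_valida (word : String) : Bool :=
  let p := PySem.Chars.lower (PySem.Chars.strip word.toList)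
  if p.length ≠ 5 ∨ ¬ (p.all fun c => PySem.Set.contains pvLettereOk c)
      ∨ ¬ (p.any fun c => PySem.Set.contains pvVocali c) then false
  else pvStreakLoop p 0

-- ===== PORT B =====
def parola_valida_alt (word : String) : Bool :=
  let p := PySem.Chars.lower (PySem.Chars.strip word.toList)
  if p.length ≠ 5 ∨ ¬ (p.all fun c => PySem.Set.contains pvLettereOk c) then false
  else (PySem.List.slice p none (some 4)).any (fun c => PySem.Set.contains pvVocali c)
       && (PySem.List.slice p (some 1) none).any (fun c => PySem.Set.contains pvVocali c)

-- ===== PRECONDITION & SPEC =====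
def Spec_parola_valida (word : String) (out : Bool) : Prop := out = parola_valida_alt word
instance (word : String) (out : Bool) : Decidable (Spec_parola_valida word out) := by unfold Spec_parola_valida; infer_instance

-- ===== CLAIM (what is proved, stated in full; the proofs are below) =====
def Claim_equal_parola_valida : Prop := ∀ (word : String), Dom_parola_valida word → Spec_parola_valida word (parola_valida word)

-- ===== LEMMAS AND PROOFS =====

-- on any 5-char list the two computations agree
theorem pv_core (a b c d e : Char) :
    (if ([a,b,c,d,e].length ≠ 5 ∨ ¬ ([a,b,c,d,e].all fun x => PySem.Set.contains pvLettereOk x)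
        ∨ ¬ ([a,b,c,d,e].any fun x => PySem.Set.contains pvVocali x)) then false
     else pvStreakLoop [a,b,c,d,e] 0)
    = (if ([a,b,c,d,e].length ≠ 5 ∨ ¬ ([a,b,c,d,e].all fun x => PySem.Set.contains pvLettereOk x)) then false
       else (PySem.List.slice [a,b,c,d,e] none (some 4)).any (fun x => PySem.Set.contains pvVocali x)
            && (PySem.List.slice [a,b,c,d,e] (some 1) none).any (fun x => PySem.Set.contains pvVocali x)) := by
  have h4 : PySem.List.slice [a,b,c,d,e] none (some 4) = [a,b,c,d] := by
    have := PySem.List.slice_to_natCast (xs := [a,b,c,d,e]) (b := 4)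
    simpa using this
  have h1 : PySem.List.slice [a,b,c,d,e] (some 1) none = [b,c,d,e] := by
    have := PySem.List.slice_from_natCast (xs := [a,b,c,d,e]) (a := 1)
    simpa using this
  rw [h4, h1]
  simp only [pvStreakLoop, List.all, List.any, List.length]
  cases hA : PySem.Set.contains pvVocali a <;>
  cases hB : PySem.Set.contains pvVocali b <;>
  cases hC : PySem.Set.contains pvVocali c <;>
  cases hD : PySem.Set.contains pvVocali d <;>
  cases hE : PySem.Set.contains pvVocali e <;>
    simp

-- ===== VERDICT (by name: the statement is the Claim_ definition above) =====
theorem parola_valida_spec : Claim_equal_parola_valida := by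
  intro word _
  unfold Spec_parola_valida parola_valida parola_valida_alt
  set p := PySem.Chars.lower (PySem.Chars.strip word.toList) with hp
  by_cases hlen : p.length = 5
  · match p, hlen with
    | [a,b,c,d,e], _ => exact pv_core a b c d e
  · simp [hlen]
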